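-- pv_equiv track=rewrite | github.com/QuoNaro/kgtt-bot | bot/utils/schedule/utils.py | find_range
-- ===== SOURCE A (Python) =====
-- def find_range(lst : list) -> tuple:
--   first, last = None, None
--   for i, s in enumerate(lst):
--       if s != '':
--           if first is None:
--               first = i
--           last = i
--   return (first, last+1) if first is not None else (None, None)
-- ===== SOURCE B (Python) =====
-- def find_range(lst: list) -> tuple:
--     first = next((i for i, s in enumerate(lst) if s != ''), None)
--     if first is None:
--         return (None, None)
--     last = next(i for i in range(len(lst) - 1, -1, -1) if lst[i] != '')
--     return (first, last + 1)
-- ===== Notes on version B (the rewrite author's own statement) =====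
-- stated objective: idiomatic
-- what changed: Replaces the single accumulating loop carrying (first, last) state with two independent stateless searches: a forward generator scan for the first non-empty index and a backward range scan for the last (which stops early instead of walking the whole list).
import Mathlib
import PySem

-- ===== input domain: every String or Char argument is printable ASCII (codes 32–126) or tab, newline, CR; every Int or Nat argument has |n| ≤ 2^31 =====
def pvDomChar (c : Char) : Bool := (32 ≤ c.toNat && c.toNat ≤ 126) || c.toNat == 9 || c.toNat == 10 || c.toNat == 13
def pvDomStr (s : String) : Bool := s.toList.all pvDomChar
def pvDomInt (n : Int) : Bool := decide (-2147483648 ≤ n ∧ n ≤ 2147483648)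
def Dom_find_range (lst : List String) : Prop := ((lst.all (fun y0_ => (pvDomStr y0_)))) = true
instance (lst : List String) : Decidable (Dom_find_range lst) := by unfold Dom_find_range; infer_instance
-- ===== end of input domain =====

-- B replaces A's single accumulating loop by two independent stateless searches
-- (forward for the first non-empty index, backward for the last); return value only.

-- ===== PORT A =====
-- loop body of A: update (first, last) on each (i, s)
def findRangeStep (st : Option Int × Option Int) (p : Int × String) : Option Int × Option Int :=
  if p.2 ≠ "" then
    ((match st.1 with | none => some p.1 | some f => some f), some p.1)
  else st

def find_range (lst : List String) : Option Int × Option Int :=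
  let st := (PySem.List.enumerate lst).foldl findRangeStep (none, none)
  match st.1 with
  | some f => (some f, st.2.map (· + 1))   -- last+1 (last is present whenever first is)
  | none => (none, none)

-- ===== PORT B =====
def find_range_alt (lst : List String) : Option Int × Option Int :=
  match ((PySem.List.enumerate lst).find? (fun p => p.2 ≠ "")).map (fun p => p.1) with
  | none => (none, none)
  | some f =>
      match (PySem.List.pyRange ((lst.length : Int) - 1) (-1) (-1)).find?
              (fun i => PySem.List.pyGet? lst i ≠ some "") with
      | some l => (some f, some (l + 1))
      | none => (none, none)   -- unreachable (next() would raise only if no non-empty exists)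

-- ===== PRECONDITION & SPEC =====
def Spec_find_range (lst : List String) (out : Option Int × Option Int) : Prop := out = find_range_alt lst
instance (lst : List String) (out : Option Int × Option Int) : Decidable (Spec_find_range lst out) := by unfold Spec_find_range; infer_instance

-- ===== CLAIM (what is proved, stated in full; the proofs are below) =====
def Claim_equal_find_range : Prop := ∀ (lst : List String), Dom_find_range lst → Spec_find_range lst (find_range lst)

-- ===== LEMMAS AND PROOFS =====

-- reference values: index of first / last non-empty string
def natFirst (xs : List String) : Option Nat := xs.findIdx? (fun s => s ≠ "")

def natLast : List String → Option Nat
  | [] => none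
  | x :: xs =>
    match natLast xs with
    | some k => some (k + 1)
    | none => if x ≠ "" then some 0 else none

def combineO (a b : Option Int) : Option Int := match a with | some x => some x | none => b

theorem combineO_none (b : Option Int) : combineO none b = b := rfl

theorem loopA (xs : List String) (s : Int) (st : Option Int × Option Int) :
    (PySem.List.enumerate xs s).foldl findRangeStep st
      = (combineO st.1 ((natFirst xs).map (fun k => s + (k : Int))),
         combineO ((natLast xs).map (fun k => s + (k : Int))) st.2) := by
  induction xs generalizing s st with
  | nil =>
    obtain ⟨a, b⟩ := st
    cases a <;> simp [PySem.List.enumerate_nil, natFirst, natLast, combineO]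
  | cons x xs ih =>
    obtain ⟨a, b⟩ := st
    rw [PySem.List.enumerate_cons]
    simp only [List.foldl_cons]
    by_cases hx : x = ""
    · subst hx
      have hstep : findRangeStep (a, b) ((s, "")) = (a, b) := by simp [findRangeStep]
      rw [hstep, ih]
      have hf : natFirst ("" :: xs) = (natFirst xs).map (· + 1) := by
        simp [natFirst, List.findIdx?_cons]
      have hl : natLast ("" :: xs) = (natLast xs).map (· + 1) := by
        simp only [natLast]
        cases natLast xs <;> simp
      rw [hf, hl]
      cases natFirst xs <;> cases natLast xs <;> cases a <;>
        simp [combineO] <;> omega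
    · have hstep : findRangeStep (a, b) ((s, x)) =
          ((match a with | none => some s | some f => some f), some s) := by
        simp [findRangeStep, hx]
      rw [hstep, ih]
      have hf : natFirst (x :: xs) = some 0 := by
        simp [natFirst, List.findIdx?_cons, hx]
      have hl : natLast (x :: xs) = match natLast xs with
          | some k => some (k + 1) | none => some 0 := by
        simp [natLast, hx]
      rw [hf, hl]
      cases natFirst xs <;> cases natLast xs <;> cases a <;>
        simp [combineO] <;> omega

theorem firstB (xs : List String) (s : Int) :
    ((PySem.List.enumerate xs s).find? (fun p => p.2 ≠ "")).map (fun p => p.1)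
      = (natFirst xs).map (fun k => s + (k : Int)) := by
  induction xs generalizing s with
  | nil => simp [PySem.List.enumerate_nil, natFirst]
  | cons x xs ih =>
    rw [PySem.List.enumerate_cons]
    by_cases hx : x = ""
    · subst hx
      rw [List.find?_cons_of_neg (by simp)]
      rw [ih]
      have hf : natFirst ("" :: xs) = (natFirst xs).map (· + 1) := by
        simp [natFirst, List.findIdx?_cons]
      rw [hf]
      cases natFirst xs <;> simp <;> first | omega | exact ⟨trivial, trivial⟩
    · rw [List.find?_cons_of_pos (by simp [hx])]
      have hf : natFirst (x :: xs) = some 0 := by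
        simp [natFirst, List.findIdx?_cons, hx]
      simp [hf]

-- find? only depends on predicate values on members
theorem find?_congr' {α : Type} (l : List α) (p q : α → Bool)
    (h : ∀ a ∈ l, p a = q a) : l.find? p = l.find? q := by
  induction l with
  | nil => rfl
  | cons x xs ih =>
    have hx := h x (by simp)
    simp only [List.find?_cons]
    rw [hx, ih (fun a ha => h a (by simp [ha]))]

theorem natLast_snoc (xs : List String) (x : String) :
    natLast (xs ++ [x]) = if x ≠ "" then some xs.length else (natLast xs).map (· + 0) := by
  induction xs with
  | nil =>
    simp only [List.nil_append, natLast]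
    by_cases hx : x = "" <;> simp [hx]
  | cons y ys ih =>
    simp only [List.cons_append, natLast, ih]
    by_cases hx : x = ""
    · simp [hx]
    · simp [hx]

theorem lastB (xs : List String) :
    (PySem.List.pyRange ((xs.length : Int) - 1) (-1) (-1)).find?
        (fun i => PySem.List.pyGet? xs i ≠ some "")
      = (natLast xs).map (fun k => (k : Int)) := by
  induction xs using List.reverseRecOn with
  | nil => simp [PySem.List.pyRange_neg_one_eq_nil, natLast]
  | append_singleton ys x ih =>
    have hlen : ((ys ++ [x]).length : Int) - 1 = (ys.length : Int) := by
      simp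
    rw [hlen]
    rw [PySem.List.pyRange_neg_one_cons (by omega)]
    rw [List.find?_cons]
    have hget : PySem.List.pyGet? (ys ++ [x]) (ys.length : Int) = some x := by
      exact_mod_cast PySem.List.pyGet?_append_length (pre := ys) (y := x) (ys := [])
    by_cases hx : x = ""
    · subst hx
      rw [hget]
      simp only [ne_eq, not_true_eq_false, decide_false]
      have hcongr : (PySem.List.pyRange ((ys.length : Int) - 1) (-1) (-1)).find?
            (fun i => PySem.List.pyGet? (ys ++ [""]) i ≠ some "")
          = (PySem.List.pyRange ((ys.length : Int) - 1) (-1) (-1)).find?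
            (fun i => PySem.List.pyGet? ys i ≠ some "") := by
        apply find?_congr'
        intro i hi
        rw [PySem.List.mem_pyRange_neg_one] at hi
        have h0 : 0 ≤ i := by omega
        have h1 : i < (ys.length : Int) := by omega
        have : PySem.List.pyGet? (ys ++ [""]) i = PySem.List.pyGet? ys i := by
          rw [PySem.List.pyGet?_of_nonneg (ys ++ [""]) h0, PySem.List.pyGet?_of_nonneg ys h0]
          rw [List.getElem?_append_left (by omega)]
        rw [this]
      rw [hcongr, ih]
      rw [natLast_snoc]
      simp
    · rw [hget]
      simp only [ne_eq]
      rw [natLast_snoc]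
      simp [hx]

theorem natLast_eq_none_iff (xs : List String) : natLast xs = none ↔ ∀ x ∈ xs, x = "" := by
  induction xs with
  | nil => simp [natLast]
  | cons x xs ih =>
    cases h : natLast xs with
    | some k =>
      have hc : natLast (x :: xs) = some (k + 1) := by simp [natLast, h]
      rw [hc]
      constructor
      · intro hcon; cases hcon
      · intro hall
        have hnone : natLast xs = none := ih.mpr (fun y hy => hall y (List.mem_cons_of_mem _ hy))
        rw [h] at hnone; cases hnone
    | none =>
      have hc : natLast (x :: xs) = if x ≠ "" then some 0 else none := by simp [natLast, h]
      rw [hc]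
      by_cases hx : x = ""
      · rw [if_neg (by simp [hx])]
        constructor
        · intro _ y hy
          rcases List.mem_cons.mp hy with rfl | hy
          · exact hx
          · exact (ih.mp h) y hy
        · intro _; rfl
      · rw [if_pos hx]
        constructor
        · intro hcon; cases hcon
        · intro hall
          exact absurd (hall x (List.mem_cons_self)) hx

theorem natFirst_eq_none_iff (xs : List String) : natFirst xs = none ↔ ∀ x ∈ xs, x = "" := by
  unfold natFirst
  rw [List.findIdx?_eq_none_iff]
  simp

theorem natFirst_none_iff_natLast_none (xs : List String) :
    natFirst xs = none ↔ natLast xs = none := by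
  rw [natFirst_eq_none_iff, natLast_eq_none_iff]

-- ===== VERDICT (by name: the statement is the Claim_ definition above) =====
theorem find_range_spec : Claim_equal_find_range := by
  intro lst _
  unfold Spec_find_range find_range find_range_alt
  rw [loopA, firstB, lastB]
  simp only [combineO_none]
  cases hf : natFirst lst with
  | none =>
    have hl : natLast lst = none := (natFirst_none_iff_natLast_none lst).mp hf
    simp [hl]
  | some f =>
    cases hl : natLast lst with
    | none =>
      exact absurd hf (by simp [(natFirst_none_iff_natLast_none lst).mpr hl])
    | some l => simp [combineO]
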